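-- pv_equiv track=rewrite | github.com/skotipalli/InfraSight-AI | src/rag/embedding_generator.py | _create_resolution_text
-- ===== SOURCE A (Python) =====
-- from typing import List, Dict, Any, Optional
--
-- def _create_resolution_text(resolution: Dict) -> str:
--     """Create searchable text from resolution data."""
--     parts = [
--         f"Resolution: {resolution.get('title', '')}",
--         f"Type: {resolution.get('resolution_type', '')}",
--         f"Description: {resolution.get('description', '')}",
--         f"Root Cause: {resolution.get('root_cause', '')}",
--         f"Fix Applied: {resolution.get('fix_applied', '')}",
--         f"Workaround: {resolution.get('workaround', '')}",
--         f"Preventive Action: {resolution.get('preventive_action', '')}"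
--     ]
--     return '\n'.join(p for p in parts if p.split(': ', 1)[-1])
-- ===== SOURCE B (Python) =====
-- _LABELS = ["Resolution", "Type", "Description", "Root Cause",
--            "Fix Applied", "Workaround", "Preventive Action"]
-- _KEY_INDEX = {"title": 0, "resolution_type": 1, "description": 2, "root_cause": 3,
--               "fix_applied": 4, "workaround": 5, "preventive_action": 6}
--
--
-- def _create_resolution_text(resolution):
--     """Create searchable text from resolution data."""
--     # One pass over the dict itself: route each recognised key into its slot
--     # (first occurrence wins), then emit the non-empty slots in label order.
--     slots = [None] * len(_LABELS)
--     for key, value in resolution.items():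
--         i = _KEY_INDEX.get(key)
--         if i is not None and slots[i] is None:
--             slots[i] = str(value)
--     out = []
--     for i, v in enumerate(slots):
--         if v:
--             out.append(_LABELS[i] + ": " + v)
--     return "\n".join(out)
-- ===== Notes on version B (the rewrite author's own statement) =====
-- stated objective: alternative
-- what changed: Instead of A's seven dict lookups building all seven 'Label: value' lines and then re-filtering them by re-splitting each line on ': ', B makes a single pass over the dict's items, routing each recognised key through a key-to-slot-index map into a slot table, and then emits the non-empty slots in label order.
import Mathlib
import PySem

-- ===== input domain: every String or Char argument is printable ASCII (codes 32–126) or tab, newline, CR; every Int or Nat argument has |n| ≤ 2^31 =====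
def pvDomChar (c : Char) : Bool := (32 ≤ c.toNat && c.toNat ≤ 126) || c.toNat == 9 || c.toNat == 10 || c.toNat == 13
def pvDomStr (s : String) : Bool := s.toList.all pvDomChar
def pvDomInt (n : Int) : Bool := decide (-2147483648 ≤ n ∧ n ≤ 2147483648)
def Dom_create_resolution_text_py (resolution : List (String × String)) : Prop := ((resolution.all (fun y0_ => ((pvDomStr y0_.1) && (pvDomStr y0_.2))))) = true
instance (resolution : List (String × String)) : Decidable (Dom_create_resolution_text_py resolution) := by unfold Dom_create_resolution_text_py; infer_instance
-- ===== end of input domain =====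

-- B replaces A's seven-lookups-then-refilter-by-re-splitting scheme with one pass over the dict's
-- items, routing each recognised key through a key→slot-index map into a slot table and emitting
-- the non-empty slots in label order (objective: alternative).

-- ===== PORT A =====
-- literal port of A: build all seven "Label: value" parts, then join those whose text after the
-- first ': ' is non-empty (truthy).  parts[-1] of split(': ', 1) is ported with pyGetD at index -1
-- (the split result is always non-empty, so Python's [-1] never raises and the default is unused).
def create_resolution_text_py (resolution : List (String × String)) : String :=
  let parts : List String := [
    "Resolution: " ++ PySem.Dict.getD ⟨resolution⟩ "title" "",
    "Type: " ++ PySem.Dict.getD ⟨resolution⟩ "resolution_type" "",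
    "Description: " ++ PySem.Dict.getD ⟨resolution⟩ "description" "",
    "Root Cause: " ++ PySem.Dict.getD ⟨resolution⟩ "root_cause" "",
    "Fix Applied: " ++ PySem.Dict.getD ⟨resolution⟩ "fix_applied" "",
    "Workaround: " ++ PySem.Dict.getD ⟨resolution⟩ "workaround" "",
    "Preventive Action: " ++ PySem.Dict.getD ⟨resolution⟩ "preventive_action" ""]
  PySem.Str.join "\n"
    (parts.filter (fun p =>
      PySem.List.pyGetD ((PySem.Str.splitMax? p ": " 1).getD []) (-1) "" != ""))

-- ===== PORT B =====
-- B's module constants _LABELS and _KEY_INDEX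
def pvLabels : List String :=
  ["Resolution", "Type", "Description", "Root Cause", "Fix Applied", "Workaround",
   "Preventive Action"]

def pvKeyIndex : List (String × Int) :=
  [("title", 0), ("resolution_type", 1), ("description", 2), ("root_cause", 3),
   ("fix_applied", 4), ("workaround", 5), ("preventive_action", 6)]

-- first loop of B: for key, value in resolution.items(): route value into its slot.
-- slots[i] reads are pyGetD; the write slots[i] = value is List.set i.toNat (i comes from the
-- literal _KEY_INDEX table, whose values are all 0..6, so Python's slots[i] = … is exactly this).
def pvFill (slots : List (Option String)) (kv : String × String) : List (Option String) :=
  match PySem.Dict.get? ⟨pvKeyIndex⟩ kv.1 with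
  | none => slots
  | some i =>
      if PySem.List.pyGetD slots i none = none then slots.set i.toNat (some kv.2) else slots

def create_resolution_text_py_alt (resolution : List (String × String)) : String :=
  let slots := resolution.foldl pvFill (List.replicate pvLabels.length (none : Option String))
  PySem.Str.join "\n"
    ((PySem.List.enumerate slots).foldl (fun out iv =>
      match iv.2 with
      | none => out
      | some v =>
          if v ≠ "" then out ++ [PySem.List.pyGetD pvLabels iv.1 "" ++ ": " ++ v] else out) [])

-- ===== PRECONDITION & SPEC =====
def Spec_create_resolution_text_py (resolution : List (String × String)) (out : String) : Prop := out = create_resolution_text_py_alt resolution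
instance (resolution : List (String × String)) (out : String) : Decidable (Spec_create_resolution_text_py resolution out) := by unfold Spec_create_resolution_text_py; infer_instance

-- ===== CLAIM (what is proved, stated in full; the proofs are below) =====
def Claim_equal_create_resolution_text_py : Prop := ∀ (resolution : List (String × String)), Dom_create_resolution_text_py resolution → Spec_create_resolution_text_py resolution (create_resolution_text_py resolution)

-- ===== LEMMAS AND PROOFS =====

-- keep the filled slot (first occurrence wins): none ← g means take g, some u stays
def pvUpd (s : Option String) (g : Option String) : Option String :=
  match s with
  | some u => some u
  | none => g

-- the fill loop, started from any 7 slots, ends with each slot i holding its old value or,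
-- if that was none, the first value in l under slot i's key
lemma pvFill_inv (l : List (String × String)) :
    ∀ s0 s1 s2 s3 s4 s5 s6 : Option String,
    l.foldl pvFill [s0, s1, s2, s3, s4, s5, s6] =
      [pvUpd s0 (PySem.Dict.get? ⟨l⟩ "title"),
       pvUpd s1 (PySem.Dict.get? ⟨l⟩ "resolution_type"),
       pvUpd s2 (PySem.Dict.get? ⟨l⟩ "description"),
       pvUpd s3 (PySem.Dict.get? ⟨l⟩ "root_cause"),
       pvUpd s4 (PySem.Dict.get? ⟨l⟩ "fix_applied"),
       pvUpd s5 (PySem.Dict.get? ⟨l⟩ "workaround"),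
       pvUpd s6 (PySem.Dict.get? ⟨l⟩ "preventive_action")] := by
  induction l with
  | nil =>
    intro s0 s1 s2 s3 s4 s5 s6
    simp only [List.foldl_nil, PySem.Dict.get?, List.find?_nil, Option.map_none]
    cases s0 <;> cases s1 <;> cases s2 <;> cases s3 <;> cases s4 <;> cases s5 <;> cases s6 <;> rfl
  | cons kv rest ih =>
    intro s0 s1 s2 s3 s4 s5 s6
    obtain ⟨k, v⟩ := kv
    simp only [List.foldl_cons]
    by_cases h0 : k = "title"
    · subst h0
      cases s0 <;>
        simp [pvFill, pvKeyIndex, PySem.Dict.get?_mk_cons, PySem.List.pyGetD, PySem.List.pyGet?,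
          PySem.List.pyIdx?, ih, pvUpd]
    by_cases h1 : k = "resolution_type"
    · subst h1
      cases s1 <;>
        simp [pvFill, pvKeyIndex, PySem.Dict.get?_mk_cons, PySem.List.pyGetD, PySem.List.pyGet?,
          PySem.List.pyIdx?, ih, pvUpd]
    by_cases h2 : k = "description"
    · subst h2
      cases s2 <;>
        simp [pvFill, pvKeyIndex, PySem.Dict.get?_mk_cons, PySem.List.pyGetD, PySem.List.pyGet?,
          PySem.List.pyIdx?, ih, pvUpd]
    by_cases h3 : k = "root_cause"
    · subst h3
      cases s3 <;>
        simp [pvFill, pvKeyIndex, PySem.Dict.get?_mk_cons, PySem.List.pyGetD, PySem.List.pyGet?,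
          PySem.List.pyIdx?, ih, pvUpd]
    by_cases h4 : k = "fix_applied"
    · subst h4
      cases s4 <;>
        simp [pvFill, pvKeyIndex, PySem.Dict.get?_mk_cons, PySem.List.pyGetD, PySem.List.pyGet?,
          PySem.List.pyIdx?, ih, pvUpd]
    by_cases h5 : k = "workaround"
    · subst h5
      cases s5 <;>
        simp [pvFill, pvKeyIndex, PySem.Dict.get?_mk_cons, PySem.List.pyGetD, PySem.List.pyGet?,
          PySem.List.pyIdx?, ih, pvUpd]
    by_cases h6 : k = "preventive_action"
    · subst h6
      cases s6 <;>
        simp [pvFill, pvKeyIndex, PySem.Dict.get?_mk_cons, PySem.List.pyGetD, PySem.List.pyGet?,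
          PySem.List.pyIdx?, ih, pvUpd]
    simp [pvFill, pvKeyIndex, PySem.Dict.get?, ih, pvUpd,
      h0, h1, h2, h3, h4, h5, h6, Ne.symm h0, Ne.symm h1, Ne.symm h2, Ne.symm h3, Ne.symm h4,
      Ne.symm h5, Ne.symm h6]

-- with the split budget exhausted (maxsplit reached 0), go returns the rest as the last piece
lemma pvGoZero (sep : List Char) (fuel : Nat) (l cur : List Char) (acc : List (List Char)) :
    PySem.Chars.splitOnMax.go sep fuel 0 l cur acc = ((cur.reverse ++ l) :: acc).reverse := by
  cases fuel with
  | zero => simp [PySem.Chars.splitOnMax.go]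
  | succ n =>
    cases l with
    | nil => simp [PySem.Chars.splitOnMax.go]
    | cons c rest => simp [PySem.Chars.splitOnMax.go]

-- for each label L (no ': ' in L), the text of L ++ ': ' ++ v after the first ': ' is exactly v
lemma pvKey1 (v : String) :
    PySem.List.pyGetD ((PySem.Str.splitMax? (("Resolution" ++ ": ") ++ v) ": " 1).getD []) (-1) "" = v := by
  simp [PySem.Str.splitMax?, PySem.Chars.splitMax?, PySem.Chars.splitOnMax,
        PySem.Chars.splitOnMax.go, pvGoZero, PySem.List.pyGetD, PySem.List.pyGet?,
        PySem.List.pyIdx?]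

lemma pvKey2 (v : String) :
    PySem.List.pyGetD ((PySem.Str.splitMax? (("Type" ++ ": ") ++ v) ": " 1).getD []) (-1) "" = v := by
  simp [PySem.Str.splitMax?, PySem.Chars.splitMax?, PySem.Chars.splitOnMax,
        PySem.Chars.splitOnMax.go, pvGoZero, PySem.List.pyGetD, PySem.List.pyGet?,
        PySem.List.pyIdx?]

lemma pvKey3 (v : String) :
    PySem.List.pyGetD ((PySem.Str.splitMax? (("Description" ++ ": ") ++ v) ": " 1).getD []) (-1) "" = v := by
  simp [PySem.Str.splitMax?, PySem.Chars.splitMax?, PySem.Chars.splitOnMax,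
        PySem.Chars.splitOnMax.go, pvGoZero, PySem.List.pyGetD, PySem.List.pyGet?,
        PySem.List.pyIdx?]

lemma pvKey4 (v : String) :
    PySem.List.pyGetD ((PySem.Str.splitMax? (("Root Cause" ++ ": ") ++ v) ": " 1).getD []) (-1) "" = v := by
  simp [PySem.Str.splitMax?, PySem.Chars.splitMax?, PySem.Chars.splitOnMax,
        PySem.Chars.splitOnMax.go, pvGoZero, PySem.List.pyGetD, PySem.List.pyGet?,
        PySem.List.pyIdx?]

lemma pvKey5 (v : String) :
    PySem.List.pyGetD ((PySem.Str.splitMax? (("Fix Applied" ++ ": ") ++ v) ": " 1).getD []) (-1) "" = v := by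
  simp [PySem.Str.splitMax?, PySem.Chars.splitMax?, PySem.Chars.splitOnMax,
        PySem.Chars.splitOnMax.go, pvGoZero, PySem.List.pyGetD, PySem.List.pyGet?,
        PySem.List.pyIdx?]

lemma pvKey6 (v : String) :
    PySem.List.pyGetD ((PySem.Str.splitMax? (("Workaround" ++ ": ") ++ v) ": " 1).getD []) (-1) "" = v := by
  simp [PySem.Str.splitMax?, PySem.Chars.splitMax?, PySem.Chars.splitOnMax,
        PySem.Chars.splitOnMax.go, pvGoZero, PySem.List.pyGetD, PySem.List.pyGet?,
        PySem.List.pyIdx?]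

lemma pvKey7 (v : String) :
    PySem.List.pyGetD ((PySem.Str.splitMax? (("Preventive Action" ++ ": ") ++ v) ": " 1).getD []) (-1) "" = v := by
  simp [PySem.Str.splitMax?, PySem.Chars.splitMax?, PySem.Chars.splitOnMax,
        PySem.Chars.splitOnMax.go, pvGoZero, PySem.List.pyGetD, PySem.List.pyGet?,
        PySem.List.pyIdx?]

-- the 7 (label, first value under the label's key) pairs both programs are about
def pvL (resolution : List (String × String)) : List (String × Option String) :=
  [("Resolution", PySem.Dict.get? ⟨resolution⟩ "title"),
   ("Type", PySem.Dict.get? ⟨resolution⟩ "resolution_type"),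
   ("Description", PySem.Dict.get? ⟨resolution⟩ "description"),
   ("Root Cause", PySem.Dict.get? ⟨resolution⟩ "root_cause"),
   ("Fix Applied", PySem.Dict.get? ⟨resolution⟩ "fix_applied"),
   ("Workaround", PySem.Dict.get? ⟨resolution⟩ "workaround"),
   ("Preventive Action", PySem.Dict.get? ⟨resolution⟩ "preventive_action")]

-- A's line for a pair, A's filter predicate, B's emitted line for a pair, B's loop body
def pvF (p : String × Option String) : String := (p.1 ++ ": ") ++ p.2.getD ""

def pvPred (p : String) : Bool :=
  PySem.List.pyGetD ((PySem.Str.splitMax? p ": " 1).getD []) (-1) "" != ""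

def pvFB (p : String × Option String) : Option String :=
  match p.2 with
  | none => none
  | some v => if v ≠ "" then some (p.1 ++ (": " ++ v)) else none

def pvBody (out : List String) (p : String × Option String) : List String :=
  match p.2 with
  | none => out
  | some v => if v ≠ "" then out ++ [p.1 ++ (": " ++ v)] else out

-- B's append-collect loop is a filterMap
lemma pvCollect (N : List (String × Option String)) :
    ∀ acc : List String, N.foldl pvBody acc = acc ++ N.filterMap pvFB := by
  induction N with
  | nil => intro acc; simp
  | cons p N ih =>
    intro acc
    obtain ⟨a, b⟩ := p
    cases b with
    | none => simp [pvBody, pvFB, ih]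
    | some v =>
      by_cases h : v = "" <;> simp [pvBody, pvFB, h, ih]

-- filtering the formatted lines by non-empty value = filterMap of B's emitter
lemma pvZip (N : List (String × Option String)) :
    (N.filter (fun p => p.2.getD "" != "")).map pvF = N.filterMap pvFB := by
  induction N with
  | nil => rfl
  | cons p N ih =>
    obtain ⟨a, b⟩ := p
    cases b with
    | none => simpa [pvFB] using ih
    | some v =>
      by_cases h : v = "" <;> simp [pvF, pvFB, h, ih, String.append_assoc]

-- on the 7 pairs, A's re-split predicate applied to the formatted line tests the raw value
lemma pvPredL (resolution : List (String × String)) :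
    ∀ x ∈ pvL resolution, (pvPred ∘ pvF) x = (fun p => p.2.getD "" != "") x := by
  intro x hx
  simp only [pvL, List.mem_cons, List.not_mem_nil, or_false] at hx
  rcases hx with rfl | rfl | rfl | rfl | rfl | rfl | rfl <;>
    simp only [Function.comp_apply, pvF, pvPred, pvKey1, pvKey2, pvKey3, pvKey4, pvKey5, pvKey6,
      pvKey7]

set_option maxHeartbeats 2000000 in
theorem pv_main (resolution : List (String × String)) :
    create_resolution_text_py resolution = create_resolution_text_py_alt resolution := by
  unfold create_resolution_text_py create_resolution_text_py_alt
  rw [show List.replicate pvLabels.length (none : Option String) =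
        [none, none, none, none, none, none, none] from rfl,
      pvFill_inv resolution none none none none none none none]
  refine congrArg (PySem.Str.join "\n") ?_
  -- both sides, presented through the pair list (definitional unfolding only)
  show ((pvL resolution).map pvF).filter pvPred = (pvL resolution).foldl pvBody []
  rw [List.filter_map, List.filter_congr (pvPredL resolution), pvCollect, pvZip, List.nil_append]

-- ===== VERDICT (by name: the statement is the Claim_ definition above) =====
theorem create_resolution_text_py_spec : Claim_equal_create_resolution_text_py := by
  intro resolution _
  unfold Spec_create_resolution_text_py
  exact pv_main resolution
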